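-- pv_equiv track=rewrite | github.com/nyucel/blm2010 | butunleme/180401057/turev.py | toplam_xiyi
-- ===== SOURCE A (Python) =====
-- def toplam_xiyi(veriler, elemanSayisi):
--     degerler = []
--     for i in range(4):
--         xiyi = 0
--         for k in range(elemanSayisi):
--             xiyi += ((k + 1) ** i)*(veriler[k])
--         degerler.append(xiyi)
--     return degerler
-- ===== SOURCE B (Python) =====
-- def toplam_xiyi(veriler, elemanSayisi):
--     s0 = s1 = s2 = s3 = 0
--     for k in range(elemanSayisi):
--         x = k + 1
--         v = veriler[k]
--         s0 += v
--         s1 += x * v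
--         s2 += x * x * v
--         s3 += x * x * x * v
--     return [s0, s1, s2, s3]
-- ===== Notes on version B (the rewrite author's own statement) =====
-- stated objective: alternative
-- what changed: Single pass over k maintaining four accumulators (s0..s3) replaces the nested loop that rescans the data once per power i and computes a ** per element.
import Mathlib
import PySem

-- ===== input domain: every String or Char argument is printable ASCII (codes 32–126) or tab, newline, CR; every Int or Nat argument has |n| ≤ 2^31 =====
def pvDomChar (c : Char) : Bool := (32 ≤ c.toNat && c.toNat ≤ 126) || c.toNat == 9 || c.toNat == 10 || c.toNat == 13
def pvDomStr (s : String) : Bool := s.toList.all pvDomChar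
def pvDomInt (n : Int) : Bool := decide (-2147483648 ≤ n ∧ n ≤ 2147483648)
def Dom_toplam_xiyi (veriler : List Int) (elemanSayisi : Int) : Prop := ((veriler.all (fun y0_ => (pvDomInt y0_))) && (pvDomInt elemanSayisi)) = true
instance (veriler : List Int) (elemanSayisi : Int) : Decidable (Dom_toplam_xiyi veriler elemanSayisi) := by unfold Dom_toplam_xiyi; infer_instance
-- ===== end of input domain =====

-- B replaces A's nested loops (one data pass per power i) by a single pass keeping four accumulators.

-- ===== PORT A =====
-- A: for i in range(4): xiyi = 0; for k in range(elemanSayisi): xiyi += ((k+1)**i)*veriler[k]; append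
def toplam_xiyi (veriler : List Int) (elemanSayisi : Int) : List Int :=
  (PySem.List.pyRange 0 4 1).foldl (fun degerler i =>
    degerler ++ [(PySem.List.pyRange 0 elemanSayisi 1).foldl
      (fun xiyi k => xiyi + ((k + 1) ^ i.toNat) * PySem.List.pyGetD veriler k 0) 0]) []

-- ===== PORT B =====
def toplamAltStep (veriler : List Int) (s : Int × Int × Int × Int) (k : Int) : Int × Int × Int × Int :=
  let x := k + 1
  let v := PySem.List.pyGetD veriler k 0
  (s.1 + v, s.2.1 + x * v, s.2.2.1 + x * x * v, s.2.2.2 + x * x * x * v)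

def toplam_xiyi_alt (veriler : List Int) (elemanSayisi : Int) : List Int :=
  let s := (PySem.List.pyRange 0 elemanSayisi 1).foldl (toplamAltStep veriler) (0, 0, 0, 0)
  [s.1, s.2.1, s.2.2.1, s.2.2.2]

-- ===== PRECONDITION & SPEC =====
-- Pre_ excludes exactly the inputs where Python A raises IndexError (elemanSayisi exceeds the list length).
def Pre_toplam_xiyi (veriler : List Int) (elemanSayisi : Int) : Prop :=
  elemanSayisi ≤ (veriler.length : Int)
instance (veriler : List Int) (elemanSayisi : Int) : Decidable (Pre_toplam_xiyi veriler elemanSayisi) := by unfold Pre_toplam_xiyi; infer_instance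

def pvWitness_toplam_xiyi : List Int × Int := ([3, -1, 4], 3)

def Spec_toplam_xiyi (veriler : List Int) (elemanSayisi : Int) (out : List Int) : Prop := out = toplam_xiyi_alt veriler elemanSayisi
instance (veriler : List Int) (elemanSayisi : Int) (out : List Int) : Decidable (Spec_toplam_xiyi veriler elemanSayisi out) := by unfold Spec_toplam_xiyi; infer_instance

-- ===== CLAIM (what is proved, stated in full; the proofs are below) =====
def Claim_equal_toplam_xiyi : Prop := ∀ (veriler : List Int) (elemanSayisi : Int), Dom_toplam_xiyi veriler elemanSayisi → Pre_toplam_xiyi veriler elemanSayisi → Spec_toplam_xiyi veriler elemanSayisi (toplam_xiyi veriler elemanSayisi)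

-- ===== LEMMAS AND PROOFS =====

-- A's inner sum with exponent i, generic over the visited index list.
def pvAsum (veriler : List Int) (i : Nat) (l : List Int) (a : Int) : Int :=
  l.foldl (fun xiyi k => xiyi + ((k + 1) ^ i) * PySem.List.pyGetD veriler k 0) a

theorem pvAsum_shift (veriler : List Int) (i : Nat) (l : List Int) (a : Int) :
    pvAsum veriler i l a = a + pvAsum veriler i l 0 := by
  induction l generalizing a with
  | nil => simp [pvAsum]
  | cons k t ih =>
      simp only [pvAsum, List.foldl_cons] at *
      rw [ih, ih (0 + (k + 1) ^ i * PySem.List.pyGetD veriler k 0)]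
      ring

theorem pvFold_alt (veriler : List Int) (l : List Int) (a b c d : Int) :
    l.foldl (toplamAltStep veriler) (a, b, c, d) =
      (a + pvAsum veriler 0 l 0, b + pvAsum veriler 1 l 0,
       c + pvAsum veriler 2 l 0, d + pvAsum veriler 3 l 0) := by
  induction l generalizing a b c d with
  | nil => simp [pvAsum]
  | cons k t ih =>
      simp only [List.foldl_cons, toplamAltStep, ih]
      have h0 := pvAsum_shift veriler 0 t (0 + (k + 1) ^ 0 * PySem.List.pyGetD veriler k 0)
      have h1 := pvAsum_shift veriler 1 t (0 + (k + 1) ^ 1 * PySem.List.pyGetD veriler k 0)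
      have h2 := pvAsum_shift veriler 2 t (0 + (k + 1) ^ 2 * PySem.List.pyGetD veriler k 0)
      have h3 := pvAsum_shift veriler 3 t (0 + (k + 1) ^ 3 * PySem.List.pyGetD veriler k 0)
      simp only [pvAsum, List.foldl_cons] at h0 h1 h2 h3 ⊢
      rw [h0, h1, h2, h3]
      refine Prod.ext ?_ (Prod.ext ?_ (Prod.ext ?_ ?_)) <;> simp <;> ring

theorem pvRange4 : PySem.List.pyRange 0 4 1 = [0, 1, 2, 3] := by decide

-- ===== VERDICT (by name: the statement is the Claim_ definition above) =====
theorem toplam_xiyi_spec : Claim_equal_toplam_xiyi := by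
  intro veriler n _ _
  show toplam_xiyi veriler n = toplam_xiyi_alt veriler n
  rw [toplam_xiyi, toplam_xiyi_alt, pvRange4, pvFold_alt]
  simp [pvAsum]
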